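-- pv_equiv track=rewrite | github.com/serafi-nebot-uib/hal9000-assembler | compiler.py | csplit
-- ===== SOURCE A (Python) =====
-- def csplit(src: str, delim: str, offset: int = 0, maxsplit: int = 0) -> tuple[list[str], int]:
--     items: list[str] = []
--     i = offset
--     prev = offset
--     while i < len(src) and (len(items) < maxsplit or maxsplit < 1):
--         if src[i] in delim:
--             substr = src[prev:i].strip(delim)
--             if len(substr) > 0:
--                 items.append(substr)
--             prev = i
--         i += 1
--
--     return (items, prev)
-- ===== SOURCE B (Python) =====
-- def csplit(src: str, delim: str, offset: int = 0, maxsplit: int = 0) -> tuple[list[str], int]: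
--     # Pass 1: collect every index (in A's scan order) holding a delimiter char.
--     positions = [i for i in range(offset, len(src)) if src[i] in delim]
--     # Pass 2: walk the delimiter positions, cutting stripped pieces.
--     items: list[str] = []
--     prev = offset
--     for pos in positions:
--         if maxsplit >= 1 and len(items) >= maxsplit:
--             break
--         piece = src[prev:pos].strip(delim)
--         if piece:
--             items.append(piece)
--         prev = pos
--     return (items, prev)
-- ===== Notes on version B (the rewrite author's own statement) =====
-- stated objective: alternative
-- what changed: A's single character-by-character while loop is replaced by a two-phase decomposition: B first builds the list of delimiter positions in scan order, then folds over that position list cutting and stripping the pieces with a running prev, honouring maxsplit before each cut.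
import Mathlib
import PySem

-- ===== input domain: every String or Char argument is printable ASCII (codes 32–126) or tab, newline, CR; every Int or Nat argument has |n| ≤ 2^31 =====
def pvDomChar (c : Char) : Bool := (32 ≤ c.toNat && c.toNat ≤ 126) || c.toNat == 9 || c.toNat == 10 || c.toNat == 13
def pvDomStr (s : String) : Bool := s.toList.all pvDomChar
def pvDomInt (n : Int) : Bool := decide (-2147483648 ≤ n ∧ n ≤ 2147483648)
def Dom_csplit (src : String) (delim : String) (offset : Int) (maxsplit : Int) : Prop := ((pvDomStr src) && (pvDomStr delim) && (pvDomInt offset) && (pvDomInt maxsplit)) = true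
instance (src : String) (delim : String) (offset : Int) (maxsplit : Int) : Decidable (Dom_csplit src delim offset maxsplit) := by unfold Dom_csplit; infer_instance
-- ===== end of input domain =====

-- ===== PORT A =====
-- B differs from A by decomposition: A is one char-by-char scan; B first collects all
-- delimiter positions, then folds over that position list. Equal return values on Pre_.

-- A's while loop: i scans from offset while i < len(src) and (len(items) < maxsplit or maxsplit < 1);
-- at a delimiter char it appends the stripped nonempty piece and moves prev.
def csplitLoopA (s d : List Char) (maxsplit : Int) (i prev : Int) (items : List String) :
    List String × Int :=
  if _h : i < (s.length : Int) ∧ ((items.length : Int) < maxsplit ∨ maxsplit < 1) then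
    match PySem.List.pyGet? s i with
    | none => (items, prev)  -- IndexError in Python; excluded by Pre_
    | some c =>
      if d.contains c then
        let substr := PySem.Chars.stripChars (PySem.List.slice s (some prev) (some i)) d
        let items' := if substr.length > 0 then items ++ [String.ofList substr] else items
        csplitLoopA s d maxsplit (i + 1) i items'
      else
        csplitLoopA s d maxsplit (i + 1) prev items
  else
    (items, prev)
termination_by ((s.length : Int) - i).toNat
decreasing_by all_goals omega

def csplit (src : String) (delim : String) (offset : Int) (maxsplit : Int) : List String × Int :=
  csplitLoopA src.toList delim.toList maxsplit offset offset []

-- ===== PORT B =====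
-- pass 1 of Source B: [i for i in range(offset, len(src)) if src[i] in delim]
def delimPositions (s d : List Char) (offset : Int) : List Int :=
  (PySem.List.pyRange offset (s.length : Int) 1).filter
    (fun i => (PySem.List.pyGet? s i).any (fun c => d.contains c))

-- pass 2 of Source B: fold over the position list with (items, prev), break at maxsplit
def csplitLoopB (s d : List Char) (maxsplit : Int) :
    List Int → List String → Int → List String × Int
  | [], items, prev => (items, prev)
  | pos :: rest, items, prev =>
    if maxsplit ≥ 1 ∧ (items.length : Int) ≥ maxsplit then (items, prev)
    else
      let piece := PySem.Chars.stripChars (PySem.List.slice s (some prev) (some pos)) d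
      let items' := if piece.length > 0 then items ++ [String.ofList piece] else items
      csplitLoopB s d maxsplit rest items' pos

def csplit_alt (src : String) (delim : String) (offset : Int) (maxsplit : Int) : List String × Int :=
  csplitLoopB src.toList delim.toList maxsplit
    (delimPositions src.toList delim.toList offset) [] offset

-- ===== PRECONDITION & SPEC =====
-- Pre_ excludes exactly the inputs where Python A raises IndexError: offset below -len(src).
def Pre_csplit (src : String) (delim : String) (offset : Int) (maxsplit : Int) : Prop :=
  -(src.toList.length : Int) ≤ offset
instance (src : String) (delim : String) (offset : Int) (maxsplit : Int) :
    Decidable (Pre_csplit src delim offset maxsplit) := by unfold Pre_csplit; infer_instance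
def pvWitness_csplit : String × String × Int × Int := ("a, bc ,d", " ,", 0, 0)

def Spec_csplit (src : String) (delim : String) (offset : Int) (maxsplit : Int) (out : List String × Int) : Prop := out = csplit_alt src delim offset maxsplit
instance (src : String) (delim : String) (offset : Int) (maxsplit : Int) (out : List String × Int) : Decidable (Spec_csplit src delim offset maxsplit out) := by unfold Spec_csplit; infer_instance

-- ===== CLAIM (what is proved, stated in full; the proofs are below) =====
def Claim_equal_csplit : Prop := ∀ (src : String) (delim : String) (offset : Int) (maxsplit : Int), Dom_csplit src delim offset maxsplit → Pre_csplit src delim offset maxsplit → Spec_csplit src delim offset maxsplit (csplit src delim offset maxsplit)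

-- ===== LEMMAS AND PROOFS =====

theorem delimPositions_nil (s d : List Char) (i : Int) (h : (s.length : Int) ≤ i) :
    delimPositions s d i = [] := by
  unfold delimPositions
  rw [PySem.List.pyRange_one]
  have : ((s.length : Int) - i).toNat = 0 := by omega
  simp [this]

theorem delimPositions_cons (s d : List Char) (i : Int) (h : i < (s.length : Int)) :
    delimPositions s d i
      = (if (PySem.List.pyGet? s i).any (fun c => d.contains c) then [i] else [])
        ++ delimPositions s d (i + 1) := by
  unfold delimPositions
  rw [PySem.List.pyRange_one_cons h, List.filter_cons]
  split <;> simp_all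

theorem csplit_loop_eq (s d : List Char) (maxsplit : Int) :
    ∀ (i prev : Int) (items : List String), -(s.length : Int) ≤ i →
      csplitLoopA s d maxsplit i prev items
        = csplitLoopB s d maxsplit (delimPositions s d i) items prev := by
  have H : ∀ (fuel : Nat) (i prev : Int) (items : List String), -(s.length : Int) ≤ i →
      ((s.length : Int) - i).toNat ≤ fuel →
      csplitLoopA s d maxsplit i prev items
        = csplitLoopB s d maxsplit (delimPositions s d i) items prev := by
    intro fuel
    induction fuel with
    | zero =>
      intro i prev items hge hf
      have hi : (s.length : Int) ≤ i := by omega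
      rw [csplitLoopA, delimPositions_nil s d i hi]
      have : ¬ (i < (s.length : Int) ∧ ((items.length : Int) < maxsplit ∨ maxsplit < 1)) := by
        intro h; omega
      rw [dif_neg this]
      rfl
    | succ n ih =>
      intro i prev items hge hf
      by_cases hi : i < (s.length : Int)
      · -- in-range index: src[i] exists
        have hsome : PySem.List.pyGet? s i ≠ none := by
          intro hn0
          rw [PySem.List.pyGet?_eq_none_iff] at hn0
          exact hn0 (by simp [PySem.Raise.InRange]; omega)
        obtain ⟨c, hc⟩ := Option.ne_none_iff_exists'.mp hsome
        by_cases hcond : (items.length : Int) < maxsplit ∨ maxsplit < 1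
        · rw [csplitLoopA, dif_pos ⟨hi, hcond⟩]
          rw [delimPositions_cons s d i hi]
          have hg : ¬ (maxsplit ≥ 1 ∧ (items.length : Int) ≥ maxsplit) := by omega
          by_cases hdel : d.contains c = true
          · have hp : (PySem.List.pyGet? s i).any (fun c => d.contains c) = true := by
              rw [hc]; simpa using hdel
            rw [if_pos hp]
            simp only [hc, hdel, if_true, List.cons_append, List.nil_append, csplitLoopB]
            rw [if_neg hg]
            exact ih (i + 1) i _ (by omega) (by omega)
          · have hdel' : d.contains c = false := by simpa using hdel
            have hp : ¬ ((PySem.List.pyGet? s i).any (fun c => d.contains c) = true) := by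
              rw [hc]; simpa using hdel
            rw [if_neg hp]
            simp only [hc, hdel', List.nil_append]
            exact ih (i + 1) prev items (by omega) (by omega)
        · rw [csplitLoopA, dif_neg (by intro h; exact hcond h.2)]
          cases hD : delimPositions s d i with
          | nil => rfl
          | cons pos rest =>
            have hg2 : maxsplit ≥ 1 ∧ (items.length : Int) ≥ maxsplit := by omega
            simp only [csplitLoopB]
            rw [if_pos hg2]
      · have hi' : (s.length : Int) ≤ i := by omega
        rw [csplitLoopA, delimPositions_nil s d i hi']
        rw [dif_neg (by intro h; omega)]
        rfl
  intro i prev items hge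
  exact H ((s.length : Int) - i).toNat i prev items hge le_rfl

-- ===== VERDICT (by name: the statement is the Claim_ definition above) =====
theorem csplit_spec : Claim_equal_csplit := by
  intro src delim offset maxsplit _ hpre
  unfold Spec_csplit csplit csplit_alt
  exact csplit_loop_eq _ _ _ _ _ _ hpre
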